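-- pv_equiv track=rewrite | github.com/deepanshudashora/Train-Em-Up | app.py | closest_valid_batch_size
-- ===== SOURCE A (Python) =====
-- def closest_valid_batch_size(test_data_size, memory_based_max, user_input_batch_size):
--     # Dynamically calculate popular batch sizes up to the minimum of test_data_size and memory_based_max
--     popular_batch_sizes = []
--     size = 4
--     max_limit = min(test_data_size, memory_based_max)  # Limit based on both test data size and memory constraint
--     while size <= max_limit:
--         popular_batch_sizes.append(size)
--         size *= 2  # Double the size to get the next popular batch size
--
--     # Initialize closest batch size to zero
--     closest_batch_size = 0
--
--     # Find the closest valid batch size that meets or exceeds user_input_batch_size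
--     for size in popular_batch_sizes:
--         if size >= user_input_batch_size:
--             closest_batch_size = size
--             break
--
--     # If no suitable size is found, choose the largest available batch size within limits
--     if closest_batch_size == 0:
--         closest_batch_size = popular_batch_sizes[-1] if popular_batch_sizes else 0
--
--     return closest_batch_size
-- ===== SOURCE B (Python) =====
-- def closest_valid_batch_size(test_data_size, memory_based_max, user_input_batch_size):
--     # No list: 0 if no power of two >= 4 fits the limit; otherwise double a single
--     # candidate while it is still below the request and doubling stays within the limit.
--     limit = min(test_data_size, memory_based_max)
--     if limit < 4:
--         return 0
--     p = 4
--     while p < user_input_batch_size and p * 2 <= limit: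
--         p *= 2
--     return p
-- ===== Notes on version B (the rewrite author's own statement) =====
-- stated objective: simpler
-- what changed: B drops the list entirely: instead of building the list of powers of two, scanning it for the first element >= the request and falling back to its last element, B returns 0 when no power of two >= 4 fits the limit and otherwise doubles a single candidate while it is below the request and doubling still fits the limit.
import Mathlib
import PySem

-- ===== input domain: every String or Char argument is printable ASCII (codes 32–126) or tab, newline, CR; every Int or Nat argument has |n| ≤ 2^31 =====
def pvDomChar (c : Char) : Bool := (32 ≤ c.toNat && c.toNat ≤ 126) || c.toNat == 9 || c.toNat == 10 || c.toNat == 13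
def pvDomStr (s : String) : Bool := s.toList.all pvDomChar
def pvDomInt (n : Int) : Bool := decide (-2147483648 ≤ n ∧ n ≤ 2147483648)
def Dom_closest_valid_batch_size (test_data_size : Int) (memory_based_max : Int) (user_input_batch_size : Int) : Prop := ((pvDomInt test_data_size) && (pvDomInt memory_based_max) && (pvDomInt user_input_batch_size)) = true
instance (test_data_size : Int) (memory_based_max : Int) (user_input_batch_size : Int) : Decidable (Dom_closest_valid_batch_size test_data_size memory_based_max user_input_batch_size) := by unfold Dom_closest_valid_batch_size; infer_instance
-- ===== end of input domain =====

-- B replaces A's build-a-list-then-scan-then-fallback pipeline by a single capped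
-- doubling of one candidate (objective: simpler; same return value everywhere).

-- ===== PORT A =====
-- A's while loop building [4, 8, 16, ...] up to max_limit.
-- The `0 < size` conjunct only makes the recursion total; the call site passes 4.
def pvBuild (size maxLimit : Int) : List Int :=
  if h : 0 < size ∧ size ≤ maxLimit then size :: pvBuild (2 * size) maxLimit else []
termination_by (maxLimit + 1 - size).toNat
decreasing_by omega

-- A's for-loop with break: first element ≥ u, else the loop leaves closest = 0.
def pvFindGE (u : Int) : List Int → Int
  | [] => 0
  | s :: rest => if s ≥ u then s else pvFindGE u rest

def closest_valid_batch_size (test_data_size : Int) (memory_based_max : Int) (user_input_batch_size : Int) : Int :=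
  let max_limit := min test_data_size memory_based_max
  let popular_batch_sizes := pvBuild 4 max_limit
  let closest := pvFindGE user_input_batch_size popular_batch_sizes
  if closest = 0 then popular_batch_sizes.getLastD 0 else closest

-- ===== PORT B =====
-- B's while loop: double p while p < u and 2*p still fits the limit.
-- The `0 < p` conjunct only makes the recursion total; the call site passes 4.
def pvCap (p limit u : Int) : Int :=
  if h : 0 < p ∧ p < u ∧ 2 * p ≤ limit then pvCap (2 * p) limit u else p
termination_by (limit + 1 - p).toNat
decreasing_by omega

def closest_valid_batch_size_alt (test_data_size : Int) (memory_based_max : Int) (user_input_batch_size : Int) : Int :=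
  let limit := min test_data_size memory_based_max
  if limit < 4 then 0 else pvCap 4 limit user_input_batch_size

-- ===== PRECONDITION & SPEC =====
def Spec_closest_valid_batch_size (test_data_size : Int) (memory_based_max : Int) (user_input_batch_size : Int) (out : Int) : Prop := out = closest_valid_batch_size_alt test_data_size memory_based_max user_input_batch_size
instance (test_data_size : Int) (memory_based_max : Int) (user_input_batch_size : Int) (out : Int) : Decidable (Spec_closest_valid_batch_size test_data_size memory_based_max user_input_batch_size out) := by unfold Spec_closest_valid_batch_size; infer_instance

-- ===== CLAIM (what is proved, stated in full; the proofs are below) =====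
def Claim_equal_closest_valid_batch_size : Prop := ∀ (test_data_size : Int) (memory_based_max : Int) (user_input_batch_size : Int), Dom_closest_valid_batch_size test_data_size memory_based_max user_input_batch_size → Spec_closest_valid_batch_size test_data_size memory_based_max user_input_batch_size (closest_valid_batch_size test_data_size memory_based_max user_input_batch_size)

-- ===== LEMMAS AND PROOFS =====

-- A's pipeline started at any positive p ≤ L equals B's capped doubling started at p.
theorem pv_key (p L u : Int) (hp : 0 < p) (hpL : p ≤ L) :
    (if pvFindGE u (pvBuild p L) = 0 then (pvBuild p L).getLastD 0
     else pvFindGE u (pvBuild p L)) = pvCap p L u := by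
  rw [pvBuild, dif_pos ⟨hp, hpL⟩, pvCap]
  by_cases hu : p ≥ u
  · rw [dif_neg (by omega : ¬(0 < p ∧ p < u ∧ 2 * p ≤ L))]
    simp only [pvFindGE, if_pos hu]
    rw [if_neg (by omega : ¬ p = 0)]
  · by_cases h2 : 2 * p ≤ L
    · have ih := pv_key (2 * p) L u (by omega) h2
      rw [dif_pos ⟨hp, by omega, h2⟩]
      rw [pvBuild, dif_pos ⟨(by omega : (0:Int) < 2 * p), h2⟩] at ih ⊢
      simp only [pvFindGE, if_neg (by omega : ¬ p ≥ u), List.getLastD_cons] at ih ⊢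
      exact ih
    · rw [dif_neg (by omega : ¬(0 < p ∧ p < u ∧ 2 * p ≤ L))]
      rw [pvBuild, dif_neg (by omega : ¬(0 < 2 * p ∧ 2 * p ≤ L))]
      simp [pvFindGE, hu, List.getLastD, List.getLast]
termination_by (L + 1 - p).toNat
decreasing_by omega

-- ===== VERDICT (by name: the statement is the Claim_ definition above) =====
theorem closest_valid_batch_size_spec : Claim_equal_closest_valid_batch_size := by
  intro t m u _
  show (if pvFindGE u (pvBuild 4 (min t m)) = 0 then (pvBuild 4 (min t m)).getLastD 0
        else pvFindGE u (pvBuild 4 (min t m)))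
      = if min t m < 4 then 0 else pvCap 4 (min t m) u
  by_cases h : min t m < 4
  · rw [if_pos h, pvBuild, dif_neg (by omega : ¬((0:Int) < 4 ∧ 4 ≤ min t m))]
    simp [pvFindGE, List.getLastD]
  · rw [if_neg h]
    exact pv_key 4 (min t m) u (by omega) (by omega)
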